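-- pv_equiv track=rewrite | github.com/vagran/phoenix | tools/gdb/phoenix_gdb.py | str_flags
-- ===== SOURCE A (Python) =====
-- def str_flags(val, flags):
--     '''
--     Convert integer value with flags into string representation. 'flags'
--     parameter is a dictionary with all flags bits defined.
--     '''
--
--     val = int(val)
--
--     if val == 0:
--         return ' <NONE>'
--     if val <= 0xff:
--         count = 8
--     elif val <= 0xffff:
--         count = 16
--     elif val <= 0xffffffff:
--         count = 32
--     else:
--         count = 64
--
--     s = ''
--     for bit_pos in range(0, count):
--         bit = 1 << bit_pos
--         if val & bit != 0:
--             if bit in flags: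
--                 s += ' %s' % flags[bit]
--             else:
--                 s += ' <BIT%d>' % bit_pos
--     return s
-- ===== SOURCE B (Python) =====
-- def str_flags(val, flags):
--     val = int(val)
--     if val == 0:
--         return ' <NONE>'
--     if val <= 0xff:
--         count = 8
--     elif val <= 0xffff:
--         count = 16
--     elif val <= 0xffffffff:
--         count = 32
--     else:
--         count = 64
--     return _pv_emit(val & ((1 << count) - 1), 0, flags)
--
-- def _pv_emit(v, pos, flags):
--     if v == 0:
--         return ''
--     if v & 1:
--         bit = 1 << pos
--         here = ' %s' % flags[bit] if bit in flags else ' <BIT%d>' % pos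
--     else:
--         here = ''
--     return here + _pv_emit(v >> 1, pos + 1, flags)
-- ===== Notes on version B (the rewrite author's own statement) =====
-- stated objective: alternative
-- what changed: A scans all 8/16/32/64 bit positions with a fixed-range loop testing val & (1<<pos); B masks val to the selected width once and then recurses on the remaining value (test low bit, halve), stopping at the highest set bit and building the string by recursion.
import Mathlib
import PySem

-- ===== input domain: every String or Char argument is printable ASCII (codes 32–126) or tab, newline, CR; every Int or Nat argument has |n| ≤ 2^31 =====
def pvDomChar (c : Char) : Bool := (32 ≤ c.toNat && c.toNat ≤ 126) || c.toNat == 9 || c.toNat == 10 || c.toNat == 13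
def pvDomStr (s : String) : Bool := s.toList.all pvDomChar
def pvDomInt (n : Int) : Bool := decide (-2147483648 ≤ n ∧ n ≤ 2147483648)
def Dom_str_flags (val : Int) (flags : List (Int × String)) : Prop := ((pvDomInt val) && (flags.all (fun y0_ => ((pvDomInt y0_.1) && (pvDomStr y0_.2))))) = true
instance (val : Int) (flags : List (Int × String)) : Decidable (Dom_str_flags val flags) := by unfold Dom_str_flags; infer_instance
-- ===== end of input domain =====

-- B replaces A's scan of all 8/16/32/64 bit positions by masking once and then
-- recursing on the remaining value (test low bit, halve), stopping at the highest
-- set bit; objective: alternative decomposition (recursion on the value).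

-- ===== PORT A =====
-- Literal port of A: fixed loop over range(0, count), testing val & (1 << bit_pos).
def str_flags (val : Int) (flags : List (Int × String)) : String :=
  -- val = int(val) is the identity on an Int argument
  if val = 0 then " <NONE>"
  else
    let count : Int :=
      if val ≤ 255 then 8
      else if val ≤ 65535 then 16
      else if val ≤ 4294967295 then 32
      else 64
    (PySem.List.pyRange 0 count).foldl (fun s bit_pos =>
      let bit : Int := (1 : Int) <<< bit_pos.toNat
      if PySem.Int.band val bit ≠ 0 then
        -- 'bit in flags' then 'flags[bit]' ported as one match on the lookup
        match (PySem.Dict.mk flags).get? bit with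
        | some v => s ++ " " ++ v
        | none   => s ++ " <BIT" ++ PySem.Int.toStr bit_pos ++ ">"
      else s) ""

-- ===== PORT B =====
-- _pv_emit: v is always the masked value, hence nonnegative, so a Nat carries it exactly.
def pvEmit (flags : List (Int × String)) (v : Nat) (pos : Nat) : String :=
  if v = 0 then ""
  else
    (if v &&& 1 ≠ 0 then
      let bit : Int := ((1 <<< pos : Nat) : Int)
      match (PySem.Dict.mk flags).get? bit with
      | some s => " " ++ s
      | none   => " <BIT" ++ PySem.Int.toStr (pos : Int) ++ ">"
     else "") ++ pvEmit flags (v >>> 1) (pos + 1)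
termination_by v
decreasing_by simp only [Nat.shiftRight_eq_div_pow, pow_one]; omega

def str_flags_alt (val : Int) (flags : List (Int × String)) : String :=
  if val = 0 then " <NONE>"
  else
    let count : Nat :=
      if val ≤ 255 then 8
      else if val ≤ 65535 then 16
      else if val ≤ 4294967295 then 32
      else 64
    -- val & ((1 << count) - 1) is nonnegative, so .toNat is exact
    pvEmit flags (PySem.Int.band val (((1 <<< count : Nat) : Int) - 1)).toNat 0

-- ===== PRECONDITION & SPEC =====
def Spec_str_flags (val : Int) (flags : List (Int × String)) (out : String) : Prop := out = str_flags_alt val flags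
instance (val : Int) (flags : List (Int × String)) (out : String) : Decidable (Spec_str_flags val flags out) := by unfold Spec_str_flags; infer_instance

-- ===== CLAIM (what is proved, stated in full; the proofs are below) =====
def Claim_equal_str_flags : Prop := ∀ (val : Int) (flags : List (Int × String)), Dom_str_flags val flags → Spec_str_flags val flags (str_flags val flags)

-- ===== LEMMAS AND PROOFS =====

-- the masked value, as a Nat
def pvMask (val : Int) (c : Nat) : Nat := (PySem.Int.band val (((1 <<< c : Nat) : Int) - 1)).toNat

theorem pvMaskCast (c : Nat) : ((1 <<< c : Nat) : Int) - 1 = ((2 ^ c - 1 : Nat) : Int) := by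
  rw [Nat.one_shiftLeft, Nat.cast_sub Nat.one_le_two_pow]
  simp

theorem pvBandMask (val : Int) (c : Nat) :
    pvMask val c =
      if 0 ≤ val then val.toNat % 2 ^ c
      else (2 ^ c - 1) - (-val - 1).toNat % 2 ^ c := by
  unfold pvMask
  rw [pvMaskCast, PySem.Int.band]
  have hb : (0:Int) ≤ ((2 ^ c - 1 : Nat) : Int) := Int.natCast_nonneg _
  by_cases h : 0 ≤ val
  · rw [if_pos h, if_pos hb, if_pos h, Int.toNat_natCast, Int.toNat_natCast,
      Nat.and_two_pow_sub_one_eq_mod]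
  · rw [if_neg h, if_pos hb, if_neg h, Int.toNat_natCast, Int.toNat_natCast,
      Nat.and_comm, Nat.and_two_pow_sub_one_eq_mod]

theorem pvMaskLt (val : Int) (c : Nat) : pvMask val c < 2 ^ c := by
  rw [pvBandMask]
  have h1 : 0 < 2 ^ c := Nat.two_pow_pos c
  have h2 : val.toNat % 2 ^ c < 2 ^ c := Nat.mod_lt _ h1
  split_ifs <;> omega

-- bit j of a masked value, read arithmetically
theorem pvDivPowModL1 (n c p : Nat) (hp : p < c) :
    n % 2 ^ c / 2 ^ p % 2 = n / 2 ^ p % 2 := by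
  have hpos : 0 < 2 ^ p := Nat.two_pow_pos p
  have hc : (2:Nat) ^ c = 2 ^ (c - p) * 2 ^ p := by rw [← pow_add]; congr 1; omega
  have hn : n = n % 2 ^ c + 2 ^ (c - p) * (n / 2 ^ c) * 2 ^ p := by
    have := Nat.div_add_mod n (2 ^ c)
    calc n = 2 ^ c * (n / 2 ^ c) + n % 2 ^ c := this.symm
      _ = n % 2 ^ c + 2 ^ (c - p) * (n / 2 ^ c) * 2 ^ p := by rw [hc]; ring
  conv_rhs => rw [hn]
  rw [Nat.add_mul_div_right _ _ hpos]
  have heven : 2 ∣ 2 ^ (c - p) := dvd_pow_self 2 (by omega)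
  obtain ⟨k, hk⟩ := heven
  rw [hk, mul_assoc]
  omega

theorem pvDivPowModL2 (x c p : Nat) (hp : p < c) (hx : x < 2 ^ c) :
    (2 ^ c - 1 - x) / 2 ^ p % 2 = 1 - x / 2 ^ p % 2 := by
  have hpos : 0 < 2 ^ p := Nat.two_pow_pos p
  have hc : 2 ^ c = 2 ^ (c - p) * 2 ^ p := by rw [← pow_add]; congr 1; omega
  set K := 2 ^ (c - p) with hK
  set q := x / 2 ^ p with hqdef
  set r := x % 2 ^ p with hrdef
  have hqr : 2 ^ p * q + r = x := Nat.div_add_mod x (2 ^ p)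
  have hr : r < 2 ^ p := Nat.mod_lt _ hpos
  have hq : q < K := by
    rw [hqdef, Nat.div_lt_iff_lt_mul hpos]
    omega
  have hKeven : 2 ∣ K := dvd_pow_self 2 (by omega)
  set a := K - 1 - q with hadef
  set b := 2 ^ p - 1 - r with hbdef
  have hA : a + q + 1 = K := by omega
  have hB : b + r + 1 = 2 ^ p := by omega
  have hsum : a * 2 ^ p + b + (2 ^ p * q + r) + 1 = K * 2 ^ p := by
    calc a * 2 ^ p + b + (2 ^ p * q + r) + 1
        = (a + q) * 2 ^ p + (b + r + 1) := by ring
      _ = (a + q) * 2 ^ p + 2 ^ p := by rw [hB]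
      _ = (a + q + 1) * 2 ^ p := by ring
      _ = K * 2 ^ p := by rw [hA]
  have hkey : 2 ^ c - 1 - x = a * 2 ^ p + b := by omega
  rw [hkey]
  have hdiv : (a * 2 ^ p + b) / 2 ^ p = a := by
    rw [mul_comm, Nat.mul_add_div hpos, Nat.div_eq_of_lt (by omega), Nat.add_zero]
  rw [hdiv]
  obtain ⟨k, hk⟩ := hKeven
  omega

-- A's per-bit test, read arithmetically on the masked value
theorem pvBridge (val : Int) (c p : Nat) (hp : p < c) :
    (PySem.Int.band val ((1 : Int) <<< p) ≠ 0) ↔ pvMask val c / 2 ^ p % 2 = 1 := by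
  have hbit : (1 : Int) <<< p = ((2 ^ p : Nat) : Int) := by
    rw [Int.shiftLeft_eq]
    push_cast
    ring
  have hbp : (0:Int) ≤ ((2 ^ p : Nat) : Int) := Int.natCast_nonneg _
  have h2p : 0 < 2 ^ p := Nat.two_pow_pos p
  rw [hbit, pvBandMask, PySem.Int.band]
  by_cases h : 0 ≤ val
  · rw [if_pos h, if_pos hbp, if_pos h, Int.toNat_natCast,
      pvDivPowModL1 _ _ _ hp, Nat.and_two_pow]
    rcases hb : val.toNat.testBit p with _ | _
    · rw [Nat.testBit_eq_decide_div_mod_eq] at hb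
      simp at hb
      simp [hb]
    · rw [Nat.testBit_eq_decide_div_mod_eq] at hb
      simp at hb
      simp [hb]
  · rw [if_neg h, if_pos hbp, if_neg h, Int.toNat_natCast]
    set u := (-val - 1).toNat with hu
    have hxlt : u % 2 ^ c < 2 ^ c := Nat.mod_lt _ (Nat.two_pow_pos c)
    rw [pvDivPowModL2 _ _ _ hp hxlt, pvDivPowModL1 _ _ _ hp, Nat.and_comm, Nat.and_two_pow]
    rcases hb : u.testBit p with _ | _
    · rw [Nat.testBit_eq_decide_div_mod_eq] at hb
      simp at hb
      simp [hb]
    · rw [Nat.testBit_eq_decide_div_mod_eq] at hb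
      simp at hb
      simp [hb]

-- B's entry text for one set bit
def pvEntry (flags : List (Int × String)) (p : Nat) : String :=
  match (PySem.Dict.mk flags).get? (((1 <<< p : Nat) : Int)) with
  | some s => " " ++ s
  | none   => " <BIT" ++ PySem.Int.toStr (p : Int) ++ ">"

theorem pvEmit_zero (flags : List (Int × String)) (pos : Nat) : pvEmit flags 0 pos = "" := by
  rw [pvEmit]
  simp

theorem pvEmit_unfold (flags : List (Int × String)) (v pos : Nat) :
    pvEmit flags v pos =
      (if v % 2 = 1 then pvEntry flags pos else "") ++ pvEmit flags (v / 2) (pos + 1) := by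
  rcases Nat.eq_zero_or_pos v with hv | hv
  · subst hv
    rw [pvEmit_zero]
    norm_num [pvEmit_zero]
  · rw [pvEmit, if_neg (by omega)]
    have h1 : v &&& 1 = v % 2 := Nat.and_one_is_mod v
    have h2 : v >>> 1 = v / 2 := by rw [Nat.shiftRight_eq_div_pow, pow_one]
    rw [h1, h2]
    congr 1
    rcases Nat.mod_two_eq_zero_or_one v with h | h <;> simp [h, pvEntry]

-- A's loop body, named for the proofs (identical to the lambda in str_flags)
def pvStepA (val : Int) (flags : List (Int × String)) : String → Int → String :=
  fun s bit_pos =>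
    let bit : Int := (1 : Int) <<< bit_pos.toNat
    if PySem.Int.band val bit ≠ 0 then
      match (PySem.Dict.mk flags).get? bit with
      | some v => s ++ " " ++ v
      | none   => s ++ " <BIT" ++ PySem.Int.toStr bit_pos ++ ">"
    else s

-- the loop ↔ recursion correspondence
theorem pvLoopEq (val : Int) (flags : List (Int × String)) :
    ∀ (c pos : Nat) (m : Nat) (s : String), m < 2 ^ c →
      (∀ j, j < c → ((PySem.Int.band val ((1 : Int) <<< (pos + j)) ≠ 0) ↔ m / 2 ^ j % 2 = 1)) →
      (List.map (fun (k : Nat) => (k : Int)) (List.range' pos c)).foldl (pvStepA val flags) s = s ++ pvEmit flags m pos := by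
  intro c
  induction c with
  | zero =>
    intro pos m s hm _
    interval_cases m
    simp [pvEmit_zero]
  | succ c ih =>
    intro pos m s hm h
    rw [List.range'_succ, List.map_cons, List.foldl_cons]
    have h0 := h 0 (by omega)
    simp only [Nat.add_zero, pow_zero, Nat.div_one] at h0
    have hstep : pvStepA val flags s ((pos : Nat) : Int) = s ++ (if m % 2 = 1 then pvEntry flags pos else "") := by
      unfold pvStepA
      simp only [Int.toNat_natCast]
      by_cases hb : PySem.Int.band val ((1 : Int) <<< pos) ≠ 0
      · rw [if_pos hb, if_pos (h0.mp hb)]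
        have hbit : (1 : Int) <<< pos = ((1 <<< pos : Nat) : Int) := by
          rw [Int.shiftLeft_eq, Nat.one_shiftLeft]
          push_cast
          ring
        rw [hbit]
        unfold pvEntry
        rcases (PySem.Dict.mk flags).get? ((1 <<< pos : Nat) : Int) with _ | v
        · simp [String.append_assoc]
        · simp [String.append_assoc]
      · rw [if_neg hb, if_neg (fun hc => hb (h0.mpr hc))]
        simp
    rw [hstep]
    have hm2 : m / 2 < 2 ^ c := by
      have : (2:Nat) ^ (c + 1) = 2 * 2 ^ c := by ring
      omega
    have h' : ∀ j, j < c → ((PySem.Int.band val ((1 : Int) <<< (pos + 1 + j)) ≠ 0) ↔ m / 2 / 2 ^ j % 2 = 1) := by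
      intro j hj
      have := h (j + 1) (by omega)
      have harr : pos + (j + 1) = pos + 1 + j := by omega
      have hdd : m / 2 / 2 ^ j = m / 2 ^ (j + 1) := by
        rw [Nat.div_div_eq_div_mul, ← pow_succ']
      rw [harr] at this
      rw [hdd]
      exact this
    rw [ih (pos + 1) (m / 2) _ hm2 h']
    conv_rhs => rw [pvEmit_unfold flags m pos]
    rw [String.append_assoc]

-- one branch of the count chain (c = 8, 16, 32, 64 — any positive width)
theorem pvBodyEq (val : Int) (flags : List (Int × String)) (c : Nat) :
    (PySem.List.pyRange 0 ((c : Nat) : Int)).foldl (pvStepA val flags) ""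
      = pvEmit flags (pvMask val c) 0 := by
  rw [PySem.List.pyRange_zero_natCast, List.range_eq_range']
  rw [pvLoopEq val flags c 0 (pvMask val c) "" (pvMaskLt val c)
    (fun j hj => by simpa using pvBridge val c j hj)]
  exact String.empty_append

-- ===== VERDICT (by name: the statement is the Claim_ definition above) =====
set_option maxRecDepth 4096 in
theorem str_flags_spec : Claim_equal_str_flags := by
  intro val flags _
  unfold Spec_str_flags str_flags str_flags_alt
  by_cases h0 : val = 0
  · simp [h0]
  · rw [if_neg h0, if_neg h0]
    split_ifs with h1 h2 h3
    · have hb := pvBodyEq val flags 8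
      rw [show ((8:Nat):Int) = (8:Int) by norm_num] at hb
      exact hb
    · have hb := pvBodyEq val flags 16
      rw [show ((16:Nat):Int) = (16:Int) by norm_num] at hb
      exact hb
    · have hb := pvBodyEq val flags 32
      rw [show ((32:Nat):Int) = (32:Int) by norm_num] at hb
      exact hb
    · have hb := pvBodyEq val flags 64
      rw [show ((64:Nat):Int) = (64:Int) by norm_num] at hb
      exact hb
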